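-- pv_equiv track=rewrite | github.com/Yash981/cp-31-sheet | 1600/C_Flexible_String.py | countNumberOfSubarrays
-- ===== SOURCE A (Python) =====
-- from itertools import groupby
--
-- def countNumberOfSubarrays(a,b):
--     n = len(a)
--     i = 0
--     j = 0
--     notEqual = [0] * n
--     res = 0
--     while i < n and j < n:
--         if a[i] != b[j]:
--             notEqual[i] = 1
--         i += 1
--         j += 1
--     for key,group in groupby(notEqual):
--         if key == 0:
--             groupLength = len(list(group))
--             res += (groupLength*(groupLength+1))//2
--     return res
-- ===== SOURCE B (Python) =====
-- def countNumberOfSubarrays(a, b):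
--     res = 0
--     run = 0
--     for i, x in enumerate(a):
--         if i >= len(b) or x == b[i]:
--             run += 1
--             res += run
--         else:
--             run = 0
--     return res
-- ===== Notes on version B (the rewrite author's own statement) =====
-- stated objective: simpler
-- what changed: Replaces the mismatch-array build plus groupby/triangular-number pass with a single enumerate loop keeping a running match-run counter and adding it to the result at each matching position (one pass, no intermediate list or groupby objects).
import Mathlib
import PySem

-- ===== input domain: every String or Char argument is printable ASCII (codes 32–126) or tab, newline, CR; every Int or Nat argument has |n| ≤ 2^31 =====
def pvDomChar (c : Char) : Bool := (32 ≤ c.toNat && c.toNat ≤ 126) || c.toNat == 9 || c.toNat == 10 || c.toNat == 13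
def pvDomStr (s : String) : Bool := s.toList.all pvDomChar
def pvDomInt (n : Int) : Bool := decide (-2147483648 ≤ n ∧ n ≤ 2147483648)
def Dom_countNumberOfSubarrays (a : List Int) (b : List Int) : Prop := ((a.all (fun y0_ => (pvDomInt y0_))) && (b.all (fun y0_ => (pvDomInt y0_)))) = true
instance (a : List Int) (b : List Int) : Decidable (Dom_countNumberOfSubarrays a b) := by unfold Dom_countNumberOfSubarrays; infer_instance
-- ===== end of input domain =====

-- B replaces A's mismatch-array build plus groupby/triangular pass with one running-run accumulator loop (objective: simpler).

-- ===== PORT A =====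
-- the while loop: i and j advance together, notEqual[i] is set to 1 on mismatch
def pvNeLoop (a b : List Int) (n : Nat) : Nat → Nat → List Int → List Int
  | i, j, notEqual =>
    if h : i < n ∧ j < n then
      let notEqual' :=
        if (PySem.List.pyGet? a (i : Int)).getD 0 ≠ (PySem.List.pyGet? b (j : Int)).getD 0
        then notEqual.set i 1 else notEqual
      pvNeLoop a b n (i + 1) (j + 1) notEqual'
    else notEqual
  termination_by i _ _ => n - i

-- itertools.groupby over notEqual, summing groupLength*(groupLength+1)//2 for the zero groups
def pvGbSum : List Int → Int
  | [] => 0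
  | k :: rest =>
    let g := rest.takeWhile (· == k)
    (if k = 0 then
        PySem.Int.floordiv ((((g.length : Int) + 1)) * ((g.length : Int) + 2)) 2
      else 0)
      + pvGbSum (rest.dropWhile (· == k))
  termination_by l => l.length
  decreasing_by
    simp only [List.length_cons]
    have := List.length_dropWhile_le (p := (· == k)) rest
    omega

def countNumberOfSubarrays (a : List Int) (b : List Int) : Int :=
  let n := a.length
  let notEqual := pvNeLoop a b n 0 0 (List.replicate n 0)
  pvGbSum notEqual

-- ===== PORT B =====
-- the enumerate loop of Source B: index i, state (run, res)
def pvAltLoop (b : List Int) : List Int → Nat → Int → Int → Int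
  | [], _, _, res => res
  | x :: xs, i, run, res =>
    if b.length ≤ i ∨ (PySem.List.pyGet? b (i : Int)).getD 0 = x then
      pvAltLoop b xs (i + 1) (run + 1) (res + (run + 1))
    else
      pvAltLoop b xs (i + 1) 0 res

def countNumberOfSubarrays_alt (a : List Int) (b : List Int) : Int :=
  pvAltLoop b a 0 0 0

-- ===== PRECONDITION & SPEC =====
-- A indexes b[j] for every j < len(a), so it raises IndexError whenever len(b) < len(a); Pre_ excludes exactly those inputs.
def Pre_countNumberOfSubarrays (a : List Int) (b : List Int) : Prop := a.length ≤ b.length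
instance (a : List Int) (b : List Int) : Decidable (Pre_countNumberOfSubarrays a b) := by
  unfold Pre_countNumberOfSubarrays; infer_instance

def pvWitness_countNumberOfSubarrays : List Int × List Int := ([1, 2, 3], [1, 5, 3])

def Spec_countNumberOfSubarrays (a : List Int) (b : List Int) (out : Int) : Prop :=
  out = countNumberOfSubarrays_alt a b
instance (a : List Int) (b : List Int) (out : Int) : Decidable (Spec_countNumberOfSubarrays a b out) := by
  unfold Spec_countNumberOfSubarrays; infer_instance

-- ===== CLAIM (what is proved, stated in full; the proofs are below) =====
def Claim_equal_countNumberOfSubarrays : Prop :=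
  ∀ (a : List Int) (b : List Int), Dom_countNumberOfSubarrays a b →
    Pre_countNumberOfSubarrays a b →
    Spec_countNumberOfSubarrays a b (countNumberOfSubarrays a b)

-- ===== LEMMAS AND PROOFS =====

-- the mismatch bit at one position (0 = equal, 1 = not equal)
def pvBit (x y : Int) : Int := if x = y then 0 else 1

-- the bare run/res recursion over a bit list: the common shape both sides reduce to
def pvBFold : List Int → Int → Int → Int
  | [], _, res => res
  | x :: xs, run, res => if x = 0 then pvBFold xs (run + 1) (res + (run + 1)) else pvBFold xs 0 res

-- triangular numbers, recursively
def pvTri : Nat → Int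
  | 0 => 0
  | k + 1 => pvTri k + (k + 1)

lemma pvTri_two_mul (k : Nat) : 2 * pvTri k = (k : Int) * ((k : Int) + 1) := by
  induction k with
  | zero => simp [pvTri]
  | succ n ih => simp only [pvTri]; push_cast; push_cast at ih; linarith

lemma pvTri_floordiv (k : Nat) :
    PySem.Int.floordiv ((k : Int) * ((k : Int) + 1)) 2 = pvTri k := by
  rw [PySem.Int.floordiv_eq_ediv_of_pos (by norm_num), ← pvTri_two_mul]
  exact Int.mul_ediv_cancel_left _ (by norm_num)

lemma pvBFold_ones (p xs : List Int) (res : Int)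
    (hp : ∀ x ∈ p, x = 1) : pvBFold (p ++ xs) 0 res = pvBFold xs 0 res := by
  induction p with
  | nil => rfl
  | cons y ys ih =>
    have hy : y = 1 := hp y (by simp)
    simp only [List.cons_append, pvBFold, hy]
    norm_num
    exact ih (fun x hx => hp x (by simp [hx]))

lemma pvBFold_zeros (k : Nat) (xs : List Int) (run res : Int) :
    pvBFold (List.replicate k 0 ++ xs) run res
      = pvBFold xs (run + k) (res + (k : Int) * run + pvTri k) := by
  induction k generalizing run res with
  | zero => simp [pvTri]
  | succ n ih =>
    simp only [List.replicate_succ, List.cons_append, pvBFold, if_pos]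
    rw [ih]
    congr 1
    · push_cast; ring
    · simp only [pvTri]; push_cast; ring

lemma pvBFold_reset (xs : List Int) (run res : Int)
    (h : ∀ y, xs.head? = some y → y ≠ 0) : pvBFold xs run res = pvBFold xs 0 res := by
  cases xs with
  | nil => rfl
  | cons y ys =>
    have := h y rfl
    simp [pvBFold, this]

lemma pvHead_dropWhile_ne_zero (l : List Int) (y : Int)
    (h : (l.dropWhile (· == (0:Int))).head? = some y) : y ≠ 0 := by
  cases hd : l.dropWhile (· == (0:Int)) with
  | nil => rw [hd] at h; simp at h
  | cons z t =>
    rw [hd] at h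
    simp only [List.head?_cons, Option.some.injEq] at h
    have h0 : 0 < (l.dropWhile (· == (0:Int))).length := by rw [hd]; simp
    have := List.dropWhile_get_zero_not (· == (0:Int)) l h0
    simp only [List.get_eq_getElem, hd] at this
    simpa [← h] using this

lemma pvGbSum_nil : pvGbSum [] = 0 := by rw [pvGbSum.eq_def]

lemma pvGbSum_cons (k : Int) (rest : List Int) :
    pvGbSum (k :: rest)
      = (if k = 0 then
          PySem.Int.floordiv ((((rest.takeWhile (· == k)).length : Int) + 1)
            * (((rest.takeWhile (· == k)).length : Int) + 2)) 2
        else 0) + pvGbSum (rest.dropWhile (· == k)) := by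
  rw [pvGbSum.eq_def]

-- gbSum over a 0/1 list equals the run/res recursion started at run = 0
lemma pvGbSum_eq_bFold (L : List Int) (res : Int) (h01 : ∀ x ∈ L, x = 0 ∨ x = 1) :
    pvBFold L 0 res = res + pvGbSum L := by
  induction hL : L.length using Nat.strong_induction_on generalizing L res with
  | _ n ih =>
  cases L with
  | nil => simp [pvBFold, pvGbSum_nil]
  | cons k rest =>
    have hsplit : rest.takeWhile (· == k) ++ rest.dropWhile (· == k) = rest :=
      List.takeWhile_append_dropWhile
    have hdlen : (rest.dropWhile (· == k)).length ≤ rest.length :=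
      List.length_dropWhile_le (p := (· == k)) rest
    have hdrop01 : ∀ x ∈ rest.dropWhile (· == k), x = 0 ∨ x = 1 := fun x hx =>
      h01 x (List.mem_cons_of_mem _ ((List.dropWhile_sublist (· == k)).subset hx))
    rcases h01 k (by simp) with hk | hk
    · -- zero group
      subst hk
      obtain ⟨m, hm⟩ : ∃ m, (rest.takeWhile (· == (0:Int))).length = m := ⟨_, rfl⟩
      have htrep : rest.takeWhile (· == (0:Int)) = List.replicate m 0 := by
        rw [← hm]
        exact List.eq_replicate_of_mem (fun x hx => by
          simpa using List.mem_takeWhile_imp hx)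
      have hrw : (0:Int) :: rest
          = List.replicate (m + 1) 0 ++ rest.dropWhile (· == (0:Int)) := by
        rw [List.replicate_succ, List.cons_append, ← htrep, hsplit]
      rw [hrw, pvBFold_zeros,
        pvBFold_reset _ _ _ (fun y hy => pvHead_dropWhile_ne_zero rest y hy),
        ih (rest.dropWhile (· == (0:Int))).length (by simp at hL; omega) _ _ hdrop01 rfl]
      rw [← hrw, pvGbSum_cons]
      simp only [hm]
      have : ((m : Int) + 1) * ((m : Int) + 2) = ((m+1 : Nat) : Int) * (((m+1 : Nat) : Int) + 1) := by
        push_cast; ring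
      rw [this, pvTri_floordiv]
      push_cast; ring
    · -- one group
      subst hk
      have htake : ∀ x ∈ rest.takeWhile (· == (1:Int)), x = 1 := fun x hx => by
        simpa using List.mem_takeWhile_imp hx
      have hstep : pvBFold ((1:Int) :: rest) 0 res
          = pvBFold (rest.dropWhile (· == (1:Int))) 0 res := by
        simp only [pvBFold]
        norm_num
        conv_lhs => rw [← hsplit]
        exact pvBFold_ones _ _ _ htake
      rw [hstep,
        ih (rest.dropWhile (· == (1:Int))).length (by simp at hL; omega) _ _ hdrop01 rfl]
      rw [pvGbSum_cons]
      norm_num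

-- the while loop builds exactly the pointwise mismatch bits
lemma pvNeLoop_spec (a b : List Int) (hab : a.length ≤ b.length) :
    ∀ (k i : Nat) (P : List Int), a.length - i = k → P.length = i → i ≤ a.length →
      pvNeLoop a b a.length i i (P ++ List.replicate (a.length - i) 0)
        = P ++ List.zipWith pvBit (a.drop i) (b.drop i) := by
  intro k
  induction k with
  | zero =>
    intro i P hk hP hi
    have hieq : i = a.length := by omega
    rw [pvNeLoop]
    rw [dif_neg (by omega)]
    subst hieq
    simp [List.drop_length]
  | succ k ih =>
    intro i P hk hP hi
    have hia : i < a.length := by omega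
    have hib : i < b.length := by omega
    rw [pvNeLoop, dif_pos ⟨hia, hia⟩]
    have hga : (PySem.List.pyGet? a (i : Int)).getD 0 = a[i] := by
      rw [PySem.List.pyGet?_natCast]
      simp [List.getElem?_eq_getElem hia]
    have hgb : (PySem.List.pyGet? b (i : Int)).getD 0 = b[i] := by
      rw [PySem.List.pyGet?_natCast]
      simp [List.getElem?_eq_getElem hib]
    have hrep : List.replicate (a.length - i) (0:Int)
        = 0 :: List.replicate (a.length - (i+1)) 0 := by
      have : a.length - i = (a.length - (i+1)) + 1 := by omega
      rw [this, List.replicate_succ]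
    have hset : (P ++ List.replicate (a.length - i) (0:Int)).set i 1
        = (P ++ [(1:Int)]) ++ List.replicate (a.length - (i+1)) 0 := by
      rw [hrep, List.set_append, if_neg (by omega)]
      simp [hP]
    have hkeep : P ++ List.replicate (a.length - i) (0:Int)
        = (P ++ [(0:Int)]) ++ List.replicate (a.length - (i+1)) 0 := by
      rw [hrep]; simp
    have hda : a.drop i = a[i] :: a.drop (i+1) := List.drop_eq_getElem_cons hia
    have hdb : b.drop i = b[i] :: b.drop (i+1) := List.drop_eq_getElem_cons hib
    simp only [hga, hgb]
    by_cases hne : a[i] ≠ b[i]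
    · rw [if_pos hne, hset,
        ih (i+1) (P ++ [(1:Int)]) (by omega) (by simp [hP]) (by omega),
        hda, hdb, List.zipWith_cons_cons]
      simp [pvBit, hne]
    · push Not at hne
      rw [if_neg (by simp [hne]), hkeep,
        ih (i+1) (P ++ [(0:Int)]) (by omega) (by simp [hP]) (by omega),
        hda, hdb, List.zipWith_cons_cons]
      simp [pvBit, hne]

-- B's loop computes the run/res recursion over the same mismatch bits
lemma pvAltLoop_spec (b : List Int) :
    ∀ (xs : List Int) (i : Nat) (run res : Int), i + xs.length ≤ b.length →
      pvAltLoop b xs i run res = pvBFold (List.zipWith pvBit xs (b.drop i)) run res := by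
  intro xs
  induction xs with
  | nil => intro i run res _; simp [pvAltLoop, pvBFold]
  | cons x t ih =>
    intro i run res hlen
    have hib : i < b.length := by simp at hlen; omega
    have hgb : (PySem.List.pyGet? b (i : Int)).getD 0 = b[i] := by
      rw [PySem.List.pyGet?_natCast]
      simp [List.getElem?_eq_getElem hib]
    have hdb : b.drop i = b[i] :: b.drop (i+1) := List.drop_eq_getElem_cons hib
    rw [hdb]
    simp only [pvAltLoop, pvBFold, hgb, List.zipWith_cons_cons]
    by_cases heq : b[i] = x
    · rw [if_pos (Or.inr heq), if_pos (by simp [pvBit, heq.symm]),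
        ih (i+1) (run+1) (res+(run+1)) (by simp at hlen ⊢; omega)]
    · rw [if_neg (by push Not; exact ⟨by omega, heq⟩),
        if_neg (by simp [pvBit]; exact fun h => absurd h.symm heq),
        ih (i+1) 0 res (by simp at hlen ⊢; omega)]

lemma pvBits01 (u v : List Int) : ∀ x ∈ List.zipWith pvBit u v, x = 0 ∨ x = 1 := by
  induction u generalizing v with
  | nil => simp
  | cons y ys ih =>
    cases v with
    | nil => simp
    | cons z zs =>
      intro x hx
      simp only [List.zipWith_cons_cons, List.mem_cons] at hx
      rcases hx with hx | hx
      · subst hx; unfold pvBit; split_ifs <;> simp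
      · exact ih zs x hx

-- ===== VERDICT (by name: the statement is the Claim_ definition above) =====
theorem countNumberOfSubarrays_spec : Claim_equal_countNumberOfSubarrays := by
  intro a b _ hpre
  unfold Pre_countNumberOfSubarrays at hpre
  unfold Spec_countNumberOfSubarrays countNumberOfSubarrays countNumberOfSubarrays_alt
  show pvGbSum (pvNeLoop a b a.length 0 0 (List.replicate a.length 0)) = pvAltLoop b a 0 0 0
  have hA := pvNeLoop_spec a b hpre a.length 0 [] (by omega) rfl (by omega)
  simp only [Nat.sub_zero, List.nil_append, List.drop_zero] at hA
  have hB := pvAltLoop_spec b a 0 0 0 (by omega)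
  simp only [List.drop_zero] at hB
  rw [hA, hB, pvGbSum_eq_bFold _ 0 (pvBits01 a b), zero_add]
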